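-- pv_equiv track=rewrite | github.com/LLucasCoding/rwpu | RWPU-Assembler.py | checkcond
-- ===== SOURCE A (Python) =====
-- def checkcond(s):
--     s = s.lower().split("\n")[0]
--     for i in ["always", "alw", "1", "true", "yes"]: # Condition 0
--         if s == i:
--             return (0, 0)
--
--     for i in ["never", "nev", "false", "no"]: # Condition 1
--         if s == i:
--             return (1, 1)
--
--     for i in ["zero", "z", "eq", "0", "equal"]: # Condition 2
--         if s == i:
--             return (0, 2)
--
--     for i in ["nonzero", "nz", "!zero", "ne", "notequal", "!equal"]: # Condition 3
--         if s == i: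
--             return (0, 3)
--
--     for i in ["cout", "overflow", "of", "co", "carryout"]: # Condition 4
--         if s == i:
--             return (0, 4)
--
--     for i in ["!cout", "nocarryout", "!carryout", "nooverflow", "nof", "!co"]: # Condition 5
--         if s == i:
--             return (0, 5)
--
--     for i in ["negative", "neg", "!positive", "!pos", "notpos", "notpositive"]: # Condition 6
--         if s == i:
--             return (0, 6)
--
--     for i in ["positive", "pos", "!negative", "!neg", "notneg", "notnegative"]: # Condition 7
--         if s == i:
--             return (0, 7)
--
--     return (2, 1)
-- ===== SOURCE B (Python) =====
-- # Aliases with their (flag, code) pairs, sorted by code-point order for binary search.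
-- _SORTED = [
--     ("!carryout", (0, 5)), ("!co", (0, 5)), ("!cout", (0, 5)), ("!equal", (0, 3)),
--     ("!neg", (0, 7)), ("!negative", (0, 7)), ("!pos", (0, 6)), ("!positive", (0, 6)),
--     ("!zero", (0, 3)), ("0", (0, 2)), ("1", (0, 0)), ("alw", (0, 0)), ("always", (0, 0)),
--     ("carryout", (0, 4)), ("co", (0, 4)), ("cout", (0, 4)), ("eq", (0, 2)),
--     ("equal", (0, 2)), ("false", (1, 1)), ("ne", (0, 3)), ("neg", (0, 6)),
--     ("negative", (0, 6)), ("nev", (1, 1)), ("never", (1, 1)), ("no", (1, 1)),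
--     ("nocarryout", (0, 5)), ("nof", (0, 5)), ("nonzero", (0, 3)), ("nooverflow", (0, 5)),
--     ("notequal", (0, 3)), ("notneg", (0, 7)), ("notnegative", (0, 7)), ("notpos", (0, 6)),
--     ("notpositive", (0, 6)), ("nz", (0, 3)), ("of", (0, 4)), ("overflow", (0, 4)),
--     ("pos", (0, 7)), ("positive", (0, 7)), ("true", (0, 0)), ("yes", (0, 0)),
--     ("z", (0, 2)), ("zero", (0, 2)),
-- ]
--
-- def checkcond(s):
--     s = s.lower().split("\n")[0]
--     lo, hi = 0, len(_SORTED)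
--     while lo < hi:
--         mid = (lo + hi) // 2
--         key, val = _SORTED[mid]
--         if key == s:
--             return val
--         if key < s:
--             lo = mid + 1
--         else:
--             hi = mid
--     return (2, 1)
-- ===== Notes on version B (the rewrite author's own statement) =====
-- stated objective: alternative
-- what changed: Replaced A's eight sequential for-loops over alias lists (up to 43 equality tests) by a hand-written lo/hi binary search over one code-point-sorted alias table with default (2, 1) when the bisection exhausts.
import Mathlib
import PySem

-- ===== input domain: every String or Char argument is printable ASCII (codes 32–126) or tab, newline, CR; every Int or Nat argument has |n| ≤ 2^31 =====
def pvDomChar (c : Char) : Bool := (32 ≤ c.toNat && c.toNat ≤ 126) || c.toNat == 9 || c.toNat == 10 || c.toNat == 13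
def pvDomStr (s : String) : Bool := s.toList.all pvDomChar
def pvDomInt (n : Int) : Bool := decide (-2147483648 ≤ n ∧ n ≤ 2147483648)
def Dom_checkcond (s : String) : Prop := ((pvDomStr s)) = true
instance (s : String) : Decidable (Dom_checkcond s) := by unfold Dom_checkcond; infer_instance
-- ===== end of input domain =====

-- B replaces A's eight sequential alias-list scans by binary search over one sorted alias table (alternative algorithm).

-- ===== PORT A =====
-- A's 'for i in [...]: if s == i: return v' loop: scan the literal list, true on first match
def condLoop (t : String) : List String → Bool
  | [] => false
  | i :: rest => if t == i then true else condLoop t rest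

-- s.split("\n")[0]: sep is the nonempty literal "\n", so split? is some; [0] exists (split is never empty)
def checkcond (s : String) : Int × Int :=
  let t := PySem.List.pyGetD ((PySem.Str.split? (PySem.Str.lower s) "\n").getD []) 0 ""
  if condLoop t ["always", "alw", "1", "true", "yes"] then (0, 0)
  else if condLoop t ["never", "nev", "false", "no"] then (1, 1)
  else if condLoop t ["zero", "z", "eq", "0", "equal"] then (0, 2)
  else if condLoop t ["nonzero", "nz", "!zero", "ne", "notequal", "!equal"] then (0, 3)
  else if condLoop t ["cout", "overflow", "of", "co", "carryout"] then (0, 4)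
  else if condLoop t ["!cout", "nocarryout", "!carryout", "nooverflow", "nof", "!co"] then (0, 5)
  else if condLoop t ["negative", "neg", "!positive", "!pos", "notpos", "notpositive"] then (0, 6)
  else if condLoop t ["positive", "pos", "!negative", "!neg", "notneg", "notnegative"] then (0, 7)
  else (2, 1)

-- ===== PORT B =====
-- Source B's _SORTED: the 43 (alias, pair) entries sorted by code-point order
def sortedTable : List (String × Int × Int) :=
  [("!carryout", (0, 5)), ("!co", (0, 5)), ("!cout", (0, 5)), ("!equal", (0, 3)),
   ("!neg", (0, 7)), ("!negative", (0, 7)), ("!pos", (0, 6)), ("!positive", (0, 6)),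
   ("!zero", (0, 3)), ("0", (0, 2)), ("1", (0, 0)), ("alw", (0, 0)), ("always", (0, 0)),
   ("carryout", (0, 4)), ("co", (0, 4)), ("cout", (0, 4)), ("eq", (0, 2)),
   ("equal", (0, 2)), ("false", (1, 1)), ("ne", (0, 3)), ("neg", (0, 6)),
   ("negative", (0, 6)), ("nev", (1, 1)), ("never", (1, 1)), ("no", (1, 1)),
   ("nocarryout", (0, 5)), ("nof", (0, 5)), ("nonzero", (0, 3)), ("nooverflow", (0, 5)),
   ("notequal", (0, 3)), ("notneg", (0, 7)), ("notnegative", (0, 7)), ("notpos", (0, 6)),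
   ("notpositive", (0, 6)), ("nz", (0, 3)), ("of", (0, 4)), ("overflow", (0, 4)),
   ("pos", (0, 7)), ("positive", (0, 7)), ("true", (0, 0)), ("yes", (0, 0)),
   ("z", (0, 2)), ("zero", (0, 2))]

-- Python's 'key < s': code-point lexicographic comparison (exact for all strings)
def charsLt : List Char → List Char → Bool
  | _, [] => false
  | [], _ :: _ => true
  | a :: as, b :: bs =>
    if a.toNat < b.toNat then true
    else if b.toNat < a.toNat then false
    else charsLt as bs

def strLt (a b : String) : Bool := charsLt a.toList b.toList

-- Source B's while loop, lo/hi bisection; fuel only makes the loop structurally terminating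
def bsearch (t : String) : Nat → Nat → Nat → Int × Int
  | _, _, 0 => (2, 1)
  | lo, hi, fuel + 1 =>
    if lo < hi then
      let p := sortedTable.getD ((lo + hi) / 2) ("", (2, 1))
      if p.1 == t then p.2
      else if strLt p.1 t then bsearch t ((lo + hi) / 2 + 1) hi fuel
      else bsearch t lo ((lo + hi) / 2) fuel
    else (2, 1)

def checkcond_alt (s : String) : Int × Int :=
  let t := PySem.List.pyGetD ((PySem.Str.split? (PySem.Str.lower s) "\n").getD []) 0 ""
  bsearch t 0 sortedTable.length sortedTable.length

-- ===== PRECONDITION & SPEC =====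
def Spec_checkcond (s : String) (out : Int × Int) : Prop := out = checkcond_alt s
instance (s : String) (out : Int × Int) : Decidable (Spec_checkcond s out) := by unfold Spec_checkcond; infer_instance

-- ===== CLAIM (what is proved, stated in full; the proofs are below) =====
def Claim_equal_checkcond : Prop := ∀ (s : String), Dom_checkcond s → Spec_checkcond s (checkcond s)

-- ===== LEMMAS AND PROOFS =====
set_option maxRecDepth 8000
set_option maxHeartbeats 2000000

-- all 43 condition aliases, for case analysis
def allAliases : List String :=
  ["always", "alw", "1", "true", "yes", "never", "nev", "false", "no",
   "zero", "z", "eq", "0", "equal", "nonzero", "nz", "!zero", "ne", "notequal", "!equal",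
   "cout", "overflow", "of", "co", "carryout", "!cout", "nocarryout", "!carryout",
   "nooverflow", "nof", "!co", "negative", "neg", "!positive", "!pos", "notpos",
   "notpositive", "positive", "pos", "!negative", "!neg", "notneg", "notnegative"]

-- binary search either returns the default or a value paired with exactly the searched key
theorem bsearch_keys (t : String) : ∀ (fuel lo hi : Nat),
    bsearch t lo hi fuel = (2, 1) ∨ t ∈ sortedTable.map Prod.fst := by
  intro fuel
  induction fuel with
  | zero => intro lo hi; left; rfl
  | succ n ih =>
    intro lo hi
    show (if lo < hi then _ else _) = _ ∨ _
    split
    · by_cases hm : (lo + hi) / 2 < sortedTable.length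
      · rw [List.getD_eq_getElem sortedTable _ hm]
        by_cases hk : (sortedTable[(lo + hi) / 2].1 == t) = true
        · right
          have := eq_of_beq hk
          exact this ▸ List.mem_map_of_mem (List.getElem_mem hm)
        · simp only [hk, Bool.false_eq_true, if_false]
          split
          · exact ih _ _
          · exact ih _ _
      · rw [List.getD_eq_default sortedTable _ (Nat.le_of_not_lt hm)]
        by_cases hk : (("" : String) == t) = true
        · left; simp [hk]
        · simp only [hk, Bool.false_eq_true, if_false]
          split
          · exact ih _ _
          · exact ih _ _
    · left; rfl

-- every key of B's sorted table is one of A's aliases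
theorem keys_sub : ∀ x ∈ sortedTable.map Prod.fst, x ∈ allAliases := by decide

-- for every string t, A's eight-loop chain equals B's binary search
theorem chain_eq_search (t : String) :
    (if condLoop t ["always", "alw", "1", "true", "yes"] then ((0 : Int), (0 : Int))
     else if condLoop t ["never", "nev", "false", "no"] then (1, 1)
     else if condLoop t ["zero", "z", "eq", "0", "equal"] then (0, 2)
     else if condLoop t ["nonzero", "nz", "!zero", "ne", "notequal", "!equal"] then (0, 3)
     else if condLoop t ["cout", "overflow", "of", "co", "carryout"] then (0, 4)
     else if condLoop t ["!cout", "nocarryout", "!carryout", "nooverflow", "nof", "!co"] then (0, 5)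
     else if condLoop t ["negative", "neg", "!positive", "!pos", "notpos", "notpositive"] then (0, 6)
     else if condLoop t ["positive", "pos", "!negative", "!neg", "notneg", "notnegative"] then (0, 7)
     else (2, 1)) = bsearch t 0 sortedTable.length sortedTable.length := by
  by_cases h : t ∈ allAliases
  · simp only [allAliases, List.mem_cons, List.not_mem_nil, or_false] at h
    rcases h with h|h|h|h|h|h|h|h|h|h|h|h|h|h|h|h|h|h|h|h|h|h|h|h|h|h|h|h|h|h|h|h|h|h|h|h|h|h|h|h|h|h|h <;>
      subst h <;> decide
  · have hb := bsearch_keys t sortedTable.length 0 sortedTable.length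
    rcases hb with hb | hb
    · rw [hb]
      simp only [allAliases, List.mem_cons, List.not_mem_nil, or_false] at h
      push Not at h
      obtain ⟨h1,h2,h3,h4,h5,h6,h7,h8,h9,h10,h11,h12,h13,h14,h15,h16,h17,h18,h19,h20,h21,h22,h23,
        h24,h25,h26,h27,h28,h29,h30,h31,h32,h33,h34,h35,h36,h37,h38,h39,h40,h41,h42,h43⟩ := h
      simp [condLoop, h1,h2,h3,h4,h5,h6,h7,h8,h9,h10,h11,h12,h13,h14,h15,h16,h17,h18,h19,h20,h21,
        h22,h23,h24,h25,h26,h27,h28,h29,h30,h31,h32,h33,h34,h35,h36,h37,h38,h39,h40,h41,h42,h43]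
    · exact absurd (keys_sub t hb) h

-- ===== VERDICT (by name: the statement is the Claim_ definition above) =====
theorem checkcond_spec : Claim_equal_checkcond := by
  intro s _
  unfold Spec_checkcond checkcond checkcond_alt
  exact chain_eq_search _
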